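-- pv_equiv track=rewrite | github.com/Pedro-080/Django_dxf | Perfil/Functions.py | buscar_proximos
-- ===== SOURCE A (Python) =====
-- def buscar_proximos(valores,alvo):
--
--     for valor in valores:
--         if valor < alvo:
--             anterior = valor
--         elif valor > alvo:
--             proximo = valor
--             break
--     return anterior,proximo
--     ...
-- ===== SOURCE B (Python) =====
-- def buscar_proximos(valores, alvo):
--     # two-phase: locate the index of the first element above alvo,
--     # then scan the preceding slice backwards for the nearest element below alvo
--     j = next(i for i, v in enumerate(valores) if v > alvo)
--     anterior = next(v for v in reversed(valores[:j]) if v < alvo)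
--     return anterior, valores[j]
-- ===== Notes on version B (the rewrite author's own statement) =====
-- stated objective: idiomatic
-- what changed: Replaces A's single forward loop with mutable accumulator variables by a two-phase decomposition: find the index of the first element above alvo with next/enumerate, then scan the slice before it backwards for the first element below alvo.
import Mathlib
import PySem

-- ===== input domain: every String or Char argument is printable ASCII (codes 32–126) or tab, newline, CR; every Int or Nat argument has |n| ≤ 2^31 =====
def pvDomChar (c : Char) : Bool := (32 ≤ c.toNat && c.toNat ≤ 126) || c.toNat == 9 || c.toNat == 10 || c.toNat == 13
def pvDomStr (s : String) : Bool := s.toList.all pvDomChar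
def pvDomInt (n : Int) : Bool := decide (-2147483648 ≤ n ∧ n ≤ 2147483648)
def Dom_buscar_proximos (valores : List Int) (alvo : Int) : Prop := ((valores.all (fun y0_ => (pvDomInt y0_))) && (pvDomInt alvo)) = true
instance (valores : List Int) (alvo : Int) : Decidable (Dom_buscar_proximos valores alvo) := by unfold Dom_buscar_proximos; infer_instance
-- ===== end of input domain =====

-- B replaces A's one-pass loop with accumulator variables by a two-phase decomposition
-- (find first element above alvo, then scan the prefix backwards); objective: idiomatic, not faster.
-- Outside Pre_ the Python A raises NameError; the ports return [] there (unclaimed).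

-- ===== PORT A =====
-- A's for-loop: `ant` is the current binding of `anterior` (none = still unbound);
-- hitting `valor > alvo` is the break; falling off the list or an unbound `anterior`
-- is Python's NameError, rendered as [].
def loopA : List Int → Int → Option Int → List Int
  | [], _, _ => []
  | v :: rest, alvo, ant =>
    if v < alvo then loopA rest alvo (some v)
    else if v > alvo then
      match ant with
      | some a => [a, v]
      | none => []
    else loopA rest alvo ant

def buscar_proximos (valores : List Int) (alvo : Int) : List Int :=
  loopA valores alvo none

-- ===== PORT B =====
-- next(i for i, v in enumerate(valores) if v > alvo)
def firstGtIdx : List Int → Int → Nat → Option Nat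
  | [], _, _ => none
  | v :: rest, alvo, i => if v > alvo then some i else firstGtIdx rest alvo (i + 1)

-- next(v for v in ... if v < alvo)
def firstLt : List Int → Int → Option Int
  | [], _ => none
  | v :: rest, alvo => if v < alvo then some v else firstLt rest alvo

def buscar_proximos_alt (valores : List Int) (alvo : Int) : List Int :=
  match firstGtIdx valores alvo 0 with
  | none => []                                  -- StopIteration (outside Pre_)
  | some j =>
    match valores[j]? with
    | none => []                                -- unreachable: j is in range
    | some p =>
      match firstLt ((valores.take j).reverse) alvo with
      | none => []                              -- StopIteration (outside Pre_)
      | some a => [a, p]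

-- ===== PRECONDITION & SPEC =====
-- Pre_ excludes exactly the inputs where A raises NameError: there must be an element
-- above alvo preceded by some element below alvo.
def Pre_buscar_proximos (valores : List Int) (alvo : Int) : Prop :=
  ∃ j < valores.length, valores.getD j 0 > alvo ∧ (∀ k < j, valores.getD k 0 ≤ alvo) ∧
    ∃ i < j, valores.getD i 0 < alvo
instance (valores : List Int) (alvo : Int) : Decidable (Pre_buscar_proximos valores alvo) := by
  unfold Pre_buscar_proximos; infer_instance

def pvWitness_buscar_proximos : List Int × Int := ([1, 5], 3)

def Spec_buscar_proximos (valores : List Int) (alvo : Int) (out : List Int) : Prop := out = buscar_proximos_alt valores alvo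
instance (valores : List Int) (alvo : Int) (out : List Int) : Decidable (Spec_buscar_proximos valores alvo out) := by unfold Spec_buscar_proximos; infer_instance

-- ===== CLAIM (what is proved, stated in full; the proofs are below) =====
def Claim_equal_buscar_proximos : Prop := ∀ (valores : List Int) (alvo : Int), Dom_buscar_proximos valores alvo → Pre_buscar_proximos valores alvo → Spec_buscar_proximos valores alvo (buscar_proximos valores alvo)

-- ===== LEMMAS AND PROOFS =====

-- B's result with an extra fallback `ant` for the backward scan (mirrors A's loop state).
def altWith (valores : List Int) (alvo : Int) (ant : Option Int) : List Int :=
  match firstGtIdx valores alvo 0 with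
  | none => []
  | some j =>
    match valores[j]? with
    | none => []
    | some p =>
      match (firstLt ((valores.take j).reverse) alvo).orElse (fun _ => ant) with
      | none => []
      | some a => [a, p]

theorem firstGtIdx_shift (l : List Int) (alvo : Int) (i : Nat) :
    firstGtIdx l alvo (i + 1) = Option.map (· + 1) (firstGtIdx l alvo i) := by
  induction l generalizing i with
  | nil => simp [firstGtIdx]
  | cons v rest ih =>
    by_cases h : v > alvo <;> simp [firstGtIdx, h, ih]

theorem firstLt_append (xs ys : List Int) (alvo : Int) :
    firstLt (xs ++ ys) alvo = (firstLt xs alvo).orElse (fun _ => firstLt ys alvo) := by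
  induction xs with
  | nil => simp [firstLt]
  | cons v rest ih =>
    by_cases h : v < alvo <;> simp [firstLt, h, ih]

theorem loopA_eq_altWith (valores : List Int) (alvo : Int) (ant : Option Int) :
    loopA valores alvo ant = altWith valores alvo ant := by
  induction valores generalizing ant with
  | nil => simp [loopA, altWith, firstGtIdx]
  | cons v rest ih =>
    by_cases hlt : v < alvo
    · have hgt : ¬ v > alvo := by omega
      rw [loopA.eq_def]
      simp only [hlt, if_true]
      rw [ih (some v)]
      unfold altWith
      simp only [firstGtIdx, hgt, if_false, firstGtIdx_shift]
      cases hj : firstGtIdx rest alvo 0 with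
      | none => simp
      | some j =>
        simp only [Option.map_some]
        have : (v :: rest)[j + 1]? = rest[j]? := by simp
        rw [this]
        cases rest[j]? with
        | none => simp
        | some p =>
          simp only [List.take_succ_cons, List.reverse_cons, firstLt_append]
          have : firstLt [v] alvo = some v := by simp [firstLt, hlt]
          rw [this]
          cases firstLt ((rest.take j).reverse) alvo <;> simp [Option.orElse]
    · by_cases hgt : v > alvo
      · rw [loopA.eq_def]
        simp only [hlt, if_false, hgt, if_true]
        unfold altWith
        simp only [firstGtIdx, hgt, if_true]
        have : (v :: rest)[0]? = some v := by simp
        rw [this]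
        simp [firstLt, Option.orElse]
        cases ant <;> simp
      · rw [loopA.eq_def]
        simp only [hlt, if_false, hgt]
        rw [ih ant]
        unfold altWith
        simp only [firstGtIdx, hgt, if_false, firstGtIdx_shift]
        cases hj : firstGtIdx rest alvo 0 with
        | none => simp
        | some j =>
          simp only [Option.map_some]
          have : (v :: rest)[j + 1]? = rest[j]? := by simp
          rw [this]
          cases rest[j]? with
          | none => simp
          | some p =>
            simp only [List.take_succ_cons, List.reverse_cons, firstLt_append]
            have : firstLt [v] alvo = none := by simp [firstLt, hlt]
            rw [this]
            cases firstLt ((rest.take j).reverse) alvo <;> simp [Option.orElse]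

theorem altWith_none (valores : List Int) (alvo : Int) :
    altWith valores alvo none = buscar_proximos_alt valores alvo := by
  unfold altWith buscar_proximos_alt
  cases firstGtIdx valores alvo 0 with
  | none => rfl
  | some j =>
    simp only
    cases valores[j]? with
    | none => rfl
    | some p =>
      cases firstLt ((valores.take j).reverse) alvo <;> simp [Option.orElse]

-- ===== VERDICT (by name: the statement is the Claim_ definition above) =====
theorem buscar_proximos_spec : Claim_equal_buscar_proximos := by
  intro valores alvo _ _
  unfold Spec_buscar_proximos buscar_proximos
  rw [loopA_eq_altWith, altWith_none]
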